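-- pv_equiv track=rewrite | github.com/alvinli7/Connections-Solver | solver/io_utils.py | validate_words
-- ===== SOURCE A (Python) =====
-- from typing import List, Tuple
--
-- def validate_words(words: List[str]) -> Tuple[bool, str]:
--     if len(words) != 16:
--         return False, f"Expected 16 entries, got {len(words)}."
--
--     seen = set()
--     dups = []
--     for w in words:
--         if w in seen:
--             dups.append(w)
--         seen.add(w)
--
--     if dups:
--         return False, f"Duplicate entries found: {sorted(set(dups))}"
--     return True, ""
-- ===== SOURCE B (Python) =====
-- from typing import List, Tuple
--
-- def validate_words(words: List[str]) -> Tuple[bool, str]: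
--     if len(words) != 16:
--         return False, f"Expected 16 entries, got {len(words)}."
--
--     # sort-then-adjacent-scan: duplicates sit next to each other in the sorted
--     # list, so one linear scan over neighbouring pairs collects the distinct
--     # duplicated words already in sorted order (no set/dict needed)
--     s = sorted(words)
--     dups = []
--     for a, b in zip(s, s[1:]):
--         if a == b and (not dups or dups[-1] != a):
--             dups.append(a)
--
--     if dups:
--         return False, f"Duplicate entries found: {dups}"
--     return True, ""
-- ===== Notes on version B (the rewrite author's own statement) =====
-- stated objective: alternative
-- what changed: Replaces A's one-pass seen-set/append loop plus final sorted(set(dups)) by a sort-then-adjacent-scan: sort the words once, then walk neighbouring pairs of the sorted list collecting each duplicated word exactly once, which yields the distinct duplicates already in sorted order.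
import Mathlib
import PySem

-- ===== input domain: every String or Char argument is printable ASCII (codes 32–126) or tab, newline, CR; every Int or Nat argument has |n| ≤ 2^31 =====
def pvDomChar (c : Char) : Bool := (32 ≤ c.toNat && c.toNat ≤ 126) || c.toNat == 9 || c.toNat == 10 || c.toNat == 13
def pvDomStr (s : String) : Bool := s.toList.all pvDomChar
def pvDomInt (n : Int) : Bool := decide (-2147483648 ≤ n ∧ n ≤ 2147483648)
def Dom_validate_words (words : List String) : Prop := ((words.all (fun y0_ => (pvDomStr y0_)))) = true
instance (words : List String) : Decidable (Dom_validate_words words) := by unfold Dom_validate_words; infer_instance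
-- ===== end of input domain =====

-- B replaces A's one-pass seen-set/append loop (plus a final sorted(set(dups))) by a
-- sort-then-adjacent-scan: sort once, then walk neighbouring pairs of the sorted list,
-- collecting each duplicated word once; the return value is identical.

-- shared f-string rendering helper: Python's str() of a list of strings (repr of each element,
-- comma-separated, in brackets); exact on Dom's characters (printable ASCII, tab, newline, CR)
def pyReprChars (cs : List Char) : List Char :=
  let q : Char := if cs.contains '\'' && !(cs.contains '"') then '"' else '\''
  (q :: cs.flatMap (fun c =>
    if c = '\\' then ['\\', '\\']
    else if c = q then ['\\', q]
    else if c = '\t' then ['\\', 't']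
    else if c = '\n' then ['\\', 'n']
    else if c = '\r' then ['\\', 'r']
    else [c])) ++ [q]

def pyStrListRepr (xs : List String) : String :=
  String.ofList ('[' :: (match xs with
    | [] => []
    | y :: ys => pyReprChars y.toList ++ ys.flatMap (fun s => ',' :: ' ' :: pyReprChars s.toList)) ++ [']'])

def pvMsgLen (words : List String) : String :=
  String.ofList ("Expected 16 entries, got ".toList ++ PySem.Int.toChars (PySem.List.len words) ++ ['.'])

def pvMsgDup (sortedDups : List String) : String :=
  String.ofList ("Duplicate entries found: ".toList ++ (pyStrListRepr sortedDups).toList)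

-- ===== PORT A =====
-- A's loop: a seen-set and a dups list, one membership test and one append per word
def pvDupsA (words : List String) : List String :=
  (words.foldl
    (fun (p : PySem.Set String × List String) w =>
      (PySem.Set.add p.1 w, if PySem.Set.contains p.1 w then p.2 ++ [w] else p.2))
    (PySem.Set.empty, [])).2

def validate_words (words : List String) : Bool × String :=
  if PySem.List.len words ≠ 16 then
    (false, pvMsgLen words)
  else if pvDupsA words ≠ [] then
    (false, pvMsgDup (PySem.List.sorted (PySem.Set.ofList (pvDupsA words)) (fun x => x) false))
  else (true, "")

-- ===== PORT B =====
-- B's loop body: if a == b and (not dups or dups[-1] != a): dups.append(a)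
def pvStepB (d : List String) (p : String × String) : List String :=
  if p.1 = p.2 ∧ (d = [] ∨ PySem.List.pyGet? d (-1) ≠ some p.1) then d ++ [p.1] else d

-- s = sorted(words); for a, b in zip(s, s[1:]): …   (s[1:] is the slice primitive)
def pvDupsB (words : List String) : List String :=
  (let s := PySem.List.sorted words (fun x => x) false
   (s.zip (PySem.List.slice s (some 1) none)).foldl pvStepB [])

def validate_words_alt (words : List String) : Bool × String :=
  if PySem.List.len words ≠ 16 then
    (false, pvMsgLen words)
  else if pvDupsB words ≠ [] then
    (false, pvMsgDup (pvDupsB words))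
  else (true, "")

-- ===== PRECONDITION & SPEC =====
def Spec_validate_words (words : List String) (out : Bool × String) : Prop := out = validate_words_alt words
instance (words : List String) (out : Bool × String) : Decidable (Spec_validate_words words out) := by unfold Spec_validate_words; infer_instance

-- ===== CLAIM (what is proved, stated in full; the proofs are below) =====
def Claim_equal_validate_words : Prop := ∀ (words : List String), Dom_validate_words words → Spec_validate_words words (validate_words words)

-- ===== LEMMAS AND PROOFS =====

-- invariant of A's loop: how often x ends up in dups, for any starting state
lemma loopA_count (l : List String) (s : PySem.Set String) (d : List String) (x : String) :
    ((l.foldl (fun (p : PySem.Set String × List String) w =>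
      (PySem.Set.add p.1 w, if PySem.Set.contains p.1 w then p.2 ++ [w] else p.2)) (s, d)).2).count x
      = d.count x + (if x ∈ s then l.count x else l.count x - 1) := by
  induction l generalizing s d with
  | nil => split_ifs <;> simp
  | cons y ys ih =>
    simp only [List.foldl_cons]
    rw [ih]
    by_cases hy : y ∈ s
    · rw [(PySem.Set.contains_iff s y).mpr hy]
      simp only [if_true, List.count_append, List.count_cons, PySem.Set.mem_add]
      split_ifs <;> simp_all <;> try omega
    · have hcy : PySem.Set.contains s y = false := by
        rw [← Bool.not_eq_true]; rw [PySem.Set.contains_iff]; exact hy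
      rw [hcy]
      simp only [Bool.false_eq_true, if_false, List.count_cons, PySem.Set.mem_add]
      split_ifs <;> simp_all

lemma mem_pvDupsA (words : List String) (x : String) :
    x ∈ pvDupsA words ↔ 2 ≤ words.count x := by
  rw [← List.count_pos_iff, pvDupsA, loopA_count]
  simp [PySem.Set.empty]
  omega

-- elements of a strictly increasing list are at most its last element
lemma le_getLast_of_pairwise_lt {d : List String} (hd : d.Pairwise (· < ·)) {x : String}
    (hx : x ∈ d) (h : d ≠ []) : x ≤ d.getLast h := by
  have hsplit := List.dropLast_append_getLast h
  rw [← hsplit] at hx hd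
  rcases List.mem_append.mp hx with h1 | h1
  · have := (List.pairwise_append.mp hd).2.2
    exact le_of_lt (this x h1 _ (List.mem_singleton.mpr rfl))
  · exact le_of_eq (List.mem_singleton.mp h1)

-- membership through B's fold: blocked appends are already members, so the fold's
-- members are the starting members plus the equal pairs' values
lemma memB_fold (l : List (String × String)) (d : List String) (x : String) :
    x ∈ l.foldl pvStepB d ↔ x ∈ d ∨ ∃ p ∈ l, p.1 = p.2 ∧ p.1 = x := by
  induction l generalizing d with
  | nil => simp
  | cons p l ih =>
    simp only [List.foldl_cons, ih, List.mem_cons]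
    unfold pvStepB
    split_ifs with h
    · simp only [List.mem_append, List.mem_singleton]
      constructor
      · rintro ((h1 | h1) | h1)
        · exact Or.inl h1
        · exact Or.inr ⟨p, Or.inl rfl, h.1, h1.symm⟩
        · obtain ⟨q, hq, hqq⟩ := h1
          exact Or.inr ⟨q, Or.inr hq, hqq⟩
      · rintro (h1 | ⟨q, hq, hqq⟩)
        · exact Or.inl (Or.inl h1)
        · rcases hq with rfl | hq'
          · exact Or.inl (Or.inr hqq.2.symm)
          · exact Or.inr ⟨q, hq', hqq⟩
    · have h' : p.1 = p.2 → d ≠ [] ∧ PySem.List.pyGet? d (-1) = some p.1 := by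
        intro hab
        refine ⟨fun hn => h ⟨hab, Or.inl hn⟩, ?_⟩
        by_contra hne
        exact h ⟨hab, Or.inr hne⟩
      constructor
      · rintro (h1 | ⟨q, hq, hqq⟩)
        · exact Or.inl h1
        · exact Or.inr ⟨q, Or.inr hq, hqq⟩
      · rintro (h1 | ⟨q, hq, hqq⟩)
        · exact Or.inl h1
        · rcases hq with rfl | hq'
          · -- blocked: the value was already the last element of d
            rcases h' hqq.1 with ⟨hne, hlast⟩
            rw [PySem.List.pyGet?_neg_one, List.getLast?_eq_getLast_of_ne_nil hne] at hlast
            have hm : q.1 ∈ d := by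
              rw [Option.some_inj] at hlast
              rw [← hlast]
              exact List.getLast_mem hne
            exact Or.inl (hqq.2 ▸ hm)
          · exact Or.inr ⟨q, hq', hqq⟩

-- B's fold keeps the accumulator strictly increasing when the pair firsts are ascending
lemma pairwiseB_fold (l : List (String × String)) (d : List String)
    (hl : l.Pairwise (fun p q => p.1 ≤ q.1)) (hd : d.Pairwise (· < ·))
    (hle : ∀ x ∈ d, ∀ p ∈ l, x ≤ p.1) :
    (l.foldl pvStepB d).Pairwise (· < ·) := by
  induction l generalizing d with
  | nil => simpa using hd
  | cons p l ih =>
    rw [List.foldl_cons]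
    obtain ⟨hpl, hl'⟩ := List.pairwise_cons.mp hl
    have hstep_lt : (pvStepB d p).Pairwise (· < ·) := by
      unfold pvStepB
      split_ifs with h
      · rcases h with ⟨-, hor⟩
        refine List.pairwise_append.mpr ⟨hd, List.pairwise_singleton _ _, ?_⟩
        intro x hx y hy
        rw [List.mem_singleton] at hy; subst hy
        rcases hor with hn | hne
        · rw [hn] at hx; exact absurd hx (List.not_mem_nil)
        · have hnil : d ≠ [] := List.ne_nil_of_mem hx
          rw [PySem.List.pyGet?_neg_one, List.getLast?_eq_getLast_of_ne_nil hnil] at hne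
          have hlastle : d.getLast hnil ≤ p.1 :=
            hle _ (List.getLast_mem hnil) p List.mem_cons_self
          have hlastlt : d.getLast hnil < p.1 :=
            lt_of_le_of_ne hlastle (fun he => hne (by rw [he]))
          exact lt_of_le_of_lt (le_getLast_of_pairwise_lt hd hx hnil) hlastlt
      · exact hd
    apply ih _ hl' hstep_lt
    intro x hx q hq
    unfold pvStepB at hx
    split_ifs at hx with h
    · rcases List.mem_append.mp hx with h1 | h1
      · exact hle x h1 q (List.mem_cons_of_mem _ hq)
      · rw [List.mem_singleton] at h1; subst h1; exact hpl q hq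
    · exact hle x hx q (List.mem_cons_of_mem _ hq)

-- the adjacent pair (a, b) sits in zip s s.tail when s = l₁ ++ a :: b :: l₂
lemma mem_zip_adj (l₁ : List String) (a b : String) (l₂ : List String) :
    (a, b) ∈ (l₁ ++ a :: b :: l₂).zip (l₁ ++ a :: b :: l₂).tail := by
  induction l₁ with
  | nil => simp [List.zip_cons_cons]
  | cons c t ih =>
    rcases he : t ++ a :: b :: l₂ with _ | ⟨h, s'⟩
    · simp at he
    · have : ((c :: t) ++ a :: b :: l₂).zip ((c :: t) ++ a :: b :: l₂).tail
          = (c, h) :: (t ++ a :: b :: l₂).zip (t ++ a :: b :: l₂).tail := by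
        simp [he, List.zip_cons_cons]
      rw [this]
      exact List.mem_cons_of_mem _ ih

-- in a weakly sorted list, an equal adjacent pair exists exactly for the words of count ≥ 2
lemma adj_iff_two_le_count (s : List String) (hs : s.Pairwise (· ≤ ·)) (x : String) :
    (∃ p ∈ s.zip s.tail, p.1 = p.2 ∧ p.1 = x) ↔ 2 ≤ s.count x := by
  constructor
  · rintro ⟨p, hp, hab, hax⟩
    obtain ⟨i, hi, hpe⟩ := List.mem_iff_getElem.mp hp
    have hlen : i + 1 < s.length := by
      have := hi
      simp only [List.length_zip, List.length_tail] at this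
      omega
    have hsi : s[i] = x := by
      have := hpe
      rw [List.getElem_zip] at this
      have h1 : s[i] = p.1 := congrArg Prod.fst this
      rw [h1, hax]
    have hsi1 : s[i + 1] = x := by
      have := hpe
      rw [List.getElem_zip] at this
      have h2 : s.tail[i]'(by simp [List.length_tail]; omega) = p.2 := congrArg Prod.snd this
      rw [List.getElem_tail] at h2
      rw [h2, ← hab, hax]
    have hdrop : s.drop i = x :: x :: s.drop (i + 2) := by
      rw [List.drop_eq_getElem_cons (by omega : i < s.length), hsi,
        List.drop_eq_getElem_cons (by omega : i + 1 < s.length), hsi1]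
    have hsub : List.Sublist [x, x] s := by
      have h1 : List.Sublist [x, x] (s.drop i) := by
        rw [hdrop]
        exact (List.sublist_append_left [x, x] (s.drop (i + 2)))
      exact h1.trans (List.drop_sublist i s)
    exact List.duplicate_iff_two_le_count.mp (List.duplicate_iff_sublist.mpr hsub)
  · intro h2
    have hsub : List.Sublist [x, x] s :=
      List.duplicate_iff_sublist.mp (List.duplicate_iff_two_le_count.mpr h2)
    obtain ⟨r₁, r₂, hse, hmem1, hxr⟩ := List.cons_sublist_iff.mp hsub
    have hmem2 : x ∈ r₂ := List.singleton_sublist.mp hxr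
    obtain ⟨u, v, huv⟩ := List.append_of_mem hmem1
    have hse2 : s = u ++ x :: (v ++ r₂) := by rw [hse, huv]; simp
    have hmemw : x ∈ v ++ r₂ := List.mem_append_right v hmem2
    rcases hw : v ++ r₂ with _ | ⟨y, r₃⟩
    · rw [hw] at hmemw; exact absurd hmemw (List.not_mem_nil)
    rw [hw] at hse2 hmemw
    -- sortedness forces the element after the first x to be x as well
    have hyx : y = x := by
      have hsx : (x :: y :: r₃).Pairwise (· ≤ ·) := by
        rw [hse2] at hs
        exact (List.pairwise_append.mp hs).2.1
      have hxy : x ≤ y := List.rel_of_pairwise_cons hsx List.mem_cons_self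
      rcases List.mem_cons.mp hmemw with rfl | hm3
      · rfl
      · have hsy : (y :: r₃).Pairwise (· ≤ ·) := (List.pairwise_cons.mp hsx).2
        exact le_antisymm (List.rel_of_pairwise_cons hsy hm3) hxy
    subst hyx
    exact ⟨(y, y), hse2 ▸ mem_zip_adj u y y r₃, rfl, rfl⟩

-- abbreviation used only in the proofs below
lemma pvDupsB_eq_fold (words : List String) :
    pvDupsB words = ((PySem.List.sorted words (fun x => x) false).zip
      (PySem.List.sorted words (fun x => x) false).tail).foldl pvStepB [] := by
  rw [pvDupsB]
  simp only [PySem.List.slice_from_one]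

lemma sorted_words_pairwise (words : List String) :
    (PySem.List.sorted words (fun x => x) false).Pairwise (· ≤ ·) :=
  PySem.List.sorted_pairwise words (fun x => x)

lemma mem_pvDupsB (words : List String) (x : String) :
    x ∈ pvDupsB words ↔ 2 ≤ words.count x := by
  rw [pvDupsB_eq_fold, memB_fold]
  have hperm := PySem.List.sorted_perm words (fun x => x) false
  rw [adj_iff_two_le_count _ (sorted_words_pairwise words) x, hperm.count_eq]
  simp

lemma pairwise_pvDupsB (words : List String) : (pvDupsB words).Pairwise (· < ·) := by
  rw [pvDupsB_eq_fold]
  apply pairwiseB_fold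
  · -- firsts of zip s s.tail ascend because s is sorted
    set s := PySem.List.sorted words (fun x => x) false with hsdef
    have hs := sorted_words_pairwise words
    rw [List.pairwise_iff_getElem] at hs ⊢
    intro i j hi hj hij
    rw [List.getElem_zip, List.getElem_zip]
    have hjl : j < s.length := by
      have hj' := hj
      rw [List.length_zip] at hj'
      exact lt_of_lt_of_le hj' (min_le_left _ _)
    exact hs i j (lt_trans hij hjl) hjl hij
  · exact List.Pairwise.nil
  · intro x hx; exact absurd hx (List.not_mem_nil)

-- the two duplicate lists: A's sorted(set(dups)) equals B's adjacent-scan output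
lemma sortedA_eq_dupsB (words : List String) :
    PySem.List.sorted (PySem.Set.ofList (pvDupsA words)) (fun x => x) false = pvDupsB words := by
  apply PySem.List.sorted_eq_of_perm_of_pairwise_lt
  · apply (List.perm_ext_iff_of_nodup ?_ (PySem.Set.nodup_ofList _)).mpr
    · intro x
      rw [PySem.Set.mem_ofList, mem_pvDupsA, mem_pvDupsB]
    · exact (pairwise_pvDupsB words).imp ne_of_lt
  · exact pairwise_pvDupsB words

lemma dups_ne_iff (words : List String) : pvDupsA words ≠ [] ↔ pvDupsB words ≠ [] := by
  have hA := mem_pvDupsA words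
  have hB := mem_pvDupsB words
  constructor <;> intro h hc <;> apply h <;> rw [List.eq_nil_iff_forall_not_mem] <;> intro x hx
  · exact (List.eq_nil_iff_forall_not_mem.mp hc x) ((hB x).mpr ((hA x).mp hx))
  · exact (List.eq_nil_iff_forall_not_mem.mp hc x) ((hA x).mpr ((hB x).mp hx))

-- ===== VERDICT (by name: the statement is the Claim_ definition above) =====
theorem validate_words_spec : Claim_equal_validate_words := by
  intro words _
  unfold Spec_validate_words validate_words validate_words_alt
  by_cases h16 : PySem.List.len words ≠ 16
  · rw [if_pos h16, if_pos h16]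
  · rw [if_neg h16, if_neg h16]
    by_cases hd : pvDupsA words ≠ []
    · rw [if_pos hd, if_pos ((dups_ne_iff words).mp hd), sortedA_eq_dupsB]
    · rw [if_neg hd, if_neg (fun h => hd ((dups_ne_iff words).mpr h))]
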